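-- pv_equiv track=rewrite | github.com/liuyang1520/LeetCode | solution/python/1090.py | largestValsFromLabels
-- ===== SOURCE A (Python) =====
-- from typing import List
--
-- def largestValsFromLabels(values: List[int], labels: List[int], num_wanted: int, use_limit: int) -> int:
--     import heapq
--     stats = {}
--     for i in range(len(values)):
--         v, l = values[i], labels[i]
--         if l not in stats:
--             stats[l] = [v]
--         elif len(stats[l]) < use_limit:
--             stats[l].append(v)
--         else:
--             heapq.heapify(stats[l])
--             heapq.heappushpop(stats[l], v)
--     res = [0] * num_wanted
--     heapq.heapify(res)
--     for nums in stats.values():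
--         for num in nums:
--             heapq.heappushpop(res, num)
--     return sum(res)
-- ===== SOURCE B (Python) =====
-- def largestValsFromLabels(values, labels, num_wanted, use_limit):
--     groups = {}
--     for i in range(len(values)):
--         groups.setdefault(labels[i], []).append(values[i])
--     cands = []
--     for g in groups.values():
--         g.sort(reverse=True)
--         k = 0
--         for v in g:
--             if k >= use_limit:
--                 break
--             cands.append(v)
--             k += 1
--     cands.sort(reverse=True)
--     total = 0
--     taken = 0
--     for v in cands:
--         if taken >= num_wanted or v <= 0:
--             break
--         total += v
--         taken += 1
--     return total
-- ===== Notes on version B (the rewrite author's own statement) =====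
-- stated objective: alternative
-- what changed: B replaces A's per-value heapify+heappushpop per-label heaps and the zero-seeded fixed-size result heap by a sort-based pipeline: group values by label, sort each group once and keep its top use_limit, sort the kept candidates once, then greedily sum the positive ones until num_wanted are taken.
-- intended difference: When use_limit <= 0 (with num_wanted > 0 and some positive value) A still keeps one value per label and returns a positive sum, while B takes at most use_limit values per label and returns 0, the intended answer for a zero per-label allowance. — e.g. on largestValsFromLabels([5], [1], 1, 0): A returns 5, B returns 0
import Mathlib
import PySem

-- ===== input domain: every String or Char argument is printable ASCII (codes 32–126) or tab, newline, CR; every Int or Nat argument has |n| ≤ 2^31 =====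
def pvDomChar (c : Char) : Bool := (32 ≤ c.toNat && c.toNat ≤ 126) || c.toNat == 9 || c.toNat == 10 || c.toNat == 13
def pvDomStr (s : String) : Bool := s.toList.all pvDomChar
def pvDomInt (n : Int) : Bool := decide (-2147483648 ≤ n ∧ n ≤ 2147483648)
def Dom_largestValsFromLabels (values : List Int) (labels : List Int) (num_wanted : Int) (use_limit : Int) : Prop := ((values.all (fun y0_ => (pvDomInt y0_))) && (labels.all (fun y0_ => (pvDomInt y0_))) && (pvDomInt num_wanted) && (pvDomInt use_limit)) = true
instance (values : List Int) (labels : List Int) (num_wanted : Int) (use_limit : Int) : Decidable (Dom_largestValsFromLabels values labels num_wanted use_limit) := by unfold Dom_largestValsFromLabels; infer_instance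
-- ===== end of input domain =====

-- B replaces A's per-label heaps and fixed-size zero-seeded result heap by sort-then-take:
-- group values by label, keep each group's top `use_limit` after one sort, sort the kept
-- candidates once and greedily add the positive ones until `num_wanted` are taken (objective:
-- alternative algorithm; equivalence is about the RETURN value only — neither program
-- mutates its arguments).

-- ===== PORT A =====
-- A's heaps are modelled as ascending-sorted lists: exact for heapq's observable contract
-- (heap[0] is the minimum, contents as a multiset), which is all A's result depends on.
def pvHeapify (l : List Int) : List Int := PySem.List.sorted l (fun x => x) false

-- heapq.heappushpop(heap, item) with the returned value ignored, on the sorted-list model: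
-- if the minimum is smaller than item, replace it by item.
def pvHeapPushPop (heap : List Int) (item : Int) : List Int :=
  match heap with
  | [] => heap
  | m :: t => if m < item then List.orderedInsert (· ≤ ·) item t else heap

-- literal port of A; 'for i in range(len(values)): v, l = values[i], labels[i]' is the fold
-- over labels.zip values (Pre_ excludes the IndexError case len(labels) < len(values))
def largestValsFromLabels (values : List Int) (labels : List Int) (num_wanted : Int) (use_limit : Int) : Int :=
  let stats : PySem.Dict Int (List Int) :=
    (labels.zip values).foldl (fun stats lv =>
      match stats.get? lv.1 with
      | none => stats.insert lv.1 [lv.2]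
      | some g =>
        if (g.length : Int) < use_limit then stats.insert lv.1 (g ++ [lv.2])
        else stats.insert lv.1 (pvHeapPushPop (pvHeapify g) lv.2)) PySem.Dict.empty
  let res0 : List Int := pvHeapify (List.replicate num_wanted.toNat 0)
  let resF : List Int :=
    (PySem.Dict.values stats).foldl (fun res nums => nums.foldl (fun r num => pvHeapPushPop r num) res) res0
  resF.sum

-- ===== PORT B =====
-- 'for v in g: if k >= use_limit: break; cands.append(v); k += 1'
def pvTakeLimit : List Int → Int → Int → List Int → List Int
  | [], _, _, cands => cands
  | v :: rest, k, ul, cands => if ul ≤ k then cands else pvTakeLimit rest (k + 1) ul (cands ++ [v])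

-- 'for v in cs: if taken >= num_wanted or v <= 0: break; total += v; taken += 1'
def pvPick : List Int → Int → Int → Int → Int
  | [], _, _, total => total
  | v :: rest, taken, nw, total => if nw ≤ taken ∨ v ≤ 0 then total else pvPick rest (taken + 1) nw (total + v)

-- B's 'for i in range(len(values)): groups.setdefault(labels[i], []).append(values[i])' is the
-- same fold over labels.zip values (Pre_ excludes the IndexError case len(labels) < len(values))
def largestValsFromLabels_alt (values : List Int) (labels : List Int) (num_wanted : Int) (use_limit : Int) : Int :=
  let groups : PySem.Dict Int (List Int) :=
    (labels.zip values).foldl (fun d lv => d.modify lv.1 [] (· ++ [lv.2])) PySem.Dict.empty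
  let cands : List Int :=
    (PySem.Dict.values groups).foldl
      (fun cands g => pvTakeLimit (PySem.List.sorted g (fun x => x) true) 0 use_limit cands) []
  pvPick (PySem.List.sorted cands (fun x => x) true) 0 num_wanted 0

-- ===== PRECONDITION & SPEC =====
-- Pre_ excludes exactly the inputs where both Pythons raise IndexError (labels shorter than values).
def Pre_largestValsFromLabels (values : List Int) (labels : List Int) (num_wanted : Int) (use_limit : Int) : Prop :=
  values.length ≤ labels.length
instance (values : List Int) (labels : List Int) (num_wanted : Int) (use_limit : Int) : Decidable (Pre_largestValsFromLabels values labels num_wanted use_limit) := by unfold Pre_largestValsFromLabels; infer_instance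
def pvWitness_largestValsFromLabels : List Int × List Int × Int × Int := ([5, 4, 3], [1, 1, 2], 2, 1)

-- When use_limit ≤ 0 (and num_wanted > 0 and some value is positive) A still keeps one value
-- per label and returns a positive sum, while B takes at most use_limit ≤ 0 values per label
-- and returns 0, the intended answer for a zero per-label allowance.
def D_largestValsFromLabels (values : List Int) (labels : List Int) (num_wanted : Int) (use_limit : Int) : Prop :=
  use_limit ≤ 0 ∧ 0 < num_wanted ∧ ∃ v ∈ values, 0 < v
instance (values : List Int) (labels : List Int) (num_wanted : Int) (use_limit : Int) : Decidable (D_largestValsFromLabels values labels num_wanted use_limit) := by unfold D_largestValsFromLabels; infer_instance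

def Spec_largestValsFromLabels (values : List Int) (labels : List Int) (num_wanted : Int) (use_limit : Int) (out : Int) : Prop := ¬ D_largestValsFromLabels values labels num_wanted use_limit → out = largestValsFromLabels_alt values labels num_wanted use_limit
instance (values : List Int) (labels : List Int) (num_wanted : Int) (use_limit : Int) (out : Int) : Decidable (Spec_largestValsFromLabels values labels num_wanted use_limit out) := by unfold Spec_largestValsFromLabels; infer_instance

def pvDiffWitness_largestValsFromLabels : List Int × List Int × Int × Int := ([5], [1], 1, 0)
def pvDiffWitnessOut_largestValsFromLabels : Int × Int := (5, 0)

-- ===== CLAIM (what is proved, stated in full; the proofs are below) =====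
def Claim_unchanged_largestValsFromLabels : Prop := ∀ (values : List Int) (labels : List Int) (num_wanted : Int) (use_limit : Int), Dom_largestValsFromLabels values labels num_wanted use_limit → Pre_largestValsFromLabels values labels num_wanted use_limit → Spec_largestValsFromLabels values labels num_wanted use_limit (largestValsFromLabels values labels num_wanted use_limit)
def Claim_changed_largestValsFromLabels : Prop := Dom_largestValsFromLabels (pvDiffWitness_largestValsFromLabels.1) (pvDiffWitness_largestValsFromLabels.2.1) (pvDiffWitness_largestValsFromLabels.2.2.1) (pvDiffWitness_largestValsFromLabels.2.2.2) ∧ Pre_largestValsFromLabels (pvDiffWitness_largestValsFromLabels.1) (pvDiffWitness_largestValsFromLabels.2.1) (pvDiffWitness_largestValsFromLabels.2.2.1) (pvDiffWitness_largestValsFromLabels.2.2.2) ∧ D_largestValsFromLabels (pvDiffWitness_largestValsFromLabels.1) (pvDiffWitness_largestValsFromLabels.2.1) (pvDiffWitness_largestValsFromLabels.2.2.1) (pvDiffWitness_largestValsFromLabels.2.2.2) ∧ largestValsFromLabels (pvDiffWitness_largestValsFromLabels.1) (pvDiffWitness_largestValsFromLabels.2.1) (pvDiffWitness_largestValsFromLabels.2.2.1)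 (pvDiffWitness_largestValsFromLabels.2.2.2) = pvDiffWitnessOut_largestValsFromLabels.1 ∧ largestValsFromLabels_alt (pvDiffWitness_largestValsFromLabels.1) (pvDiffWitness_largestValsFromLabels.2.1) (pvDiffWitness_largestValsFromLabels.2.2.1) (pvDiffWitness_largestValsFromLabels.2.2.2) = pvDiffWitnessOut_largestValsFromLabels.2 ∧ pvDiffWitnessOut_largestValsFromLabels.1 ≠ pvDiffWitnessOut_largestValsFromLabels.2
def Claim_exact_largestValsFromLabels : Prop := ∀ (values : List Int) (labels : List Int) (num_wanted : Int) (use_limit : Int), Dom_largestValsFromLabels values labels num_wanted use_limit → Pre_largestValsFromLabels values labels num_wanted use_limit → D_largestValsFromLabels values labels num_wanted use_limit → largestValsFromLabels values labels num_wanted use_limit ≠ largestValsFromLabels_alt values labels num_wanted use_limit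

-- ===== LEMMAS AND PROOFS =====

-- A's per-label update step ('some' branch of the dict fold), and its fold over a whole group
def pvCapStep (ul : Int) (m : List Int) (v : Int) : List Int :=
  if (m.length : Int) < ul then m ++ [v] else pvHeapPushPop (pvHeapify m) v
def pvCapFold (ul : Int) (g : List Int) : List Int :=
  match g with
  | [] => []
  | v :: rest => rest.foldl (pvCapStep ul) [v]

theorem pvHeapify_pairwise (l : List Int) : (pvHeapify l).Pairwise (· ≤ ·) := by
  have := PySem.List.sorted_pairwise (xs := l) (key := fun x : Int => x)
  simpa [pvHeapify] using this

theorem pvHeapify_perm (l : List Int) : (pvHeapify l).Perm l := by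
  simpa [pvHeapify] using PySem.List.sorted_perm (xs := l) (key := fun x : Int => x) (rev := false)

theorem pvHeapify_congr_perm {l l' : List Int} (h : l.Perm l') : pvHeapify l = pvHeapify l' := by
  simpa [pvHeapify] using PySem.List.sorted_eq_sorted_of_perm l l' (fun x : Int => x) (fun a b => id) h

theorem pvHeapify_eq_self {l : List Int} (h : l.Pairwise (· ≤ ·)) : pvHeapify l = l := by
  have := PySem.List.sorted_eq_self_of_pairwise (xs := l) (key := fun x : Int => x) (by simpa using h)
  simpa [pvHeapify] using this

theorem pvHeapify_cons (x : Int) (l : List Int) :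
    pvHeapify (x :: l) = List.orderedInsert (· ≤ ·) x (pvHeapify l) := by
  have hperm : (List.orderedInsert (· ≤ ·) x (pvHeapify l)).Perm (x :: l) :=
    (List.perm_orderedInsert _ _ _).trans ((pvHeapify_perm l).cons x)
  have hpw : (List.orderedInsert (· ≤ ·) x (pvHeapify l)).Pairwise (· ≤ ·) :=
    List.Pairwise.orderedInsert x (pvHeapify l) (pvHeapify_pairwise l)
  have := PySem.List.sorted_id_eq_of_perm_of_pairwise (xs := x :: l)
    (ys := List.orderedInsert (· ≤ ·) x (pvHeapify l)) hperm hpw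
  simpa [pvHeapify] using this

theorem pvHeapPushPop_eq_tail (h : List Int) (x : Int) :
    pvHeapPushPop h x = (List.orderedInsert (· ≤ ·) x h).tail := by
  cases h with
  | nil => simp [pvHeapPushPop, List.orderedInsert]
  | cons m t =>
    simp only [pvHeapPushPop, List.orderedInsert]
    by_cases hc : m < x
    · rw [if_pos hc, if_neg (by omega : ¬ x ≤ m)]
      rfl
    · rw [if_neg hc, if_pos (by omega : x ≤ m)]
      rfl

theorem drop_orderedInsert_drop (S : List Int) (hS : S.Pairwise (· ≤ ·)) (v : Int) (d : Nat) :
    (List.orderedInsert (· ≤ ·) v (S.drop d)).drop 1 = (List.orderedInsert (· ≤ ·) v S).drop (d + 1) := by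
  induction S generalizing d with
  | nil => cases d <;> simp [List.orderedInsert]
  | cons a S' ih =>
    cases d with
    | zero => simp
    | succ d' =>
      have hS' : S'.Pairwise (· ≤ ·) := (List.pairwise_cons.mp hS).2
      have hstep : (a :: S').drop (d' + 1) = S'.drop d' := rfl
      rw [hstep, ih hS' d']
      by_cases hva : v ≤ a
      · rw [show List.orderedInsert (· ≤ ·) v (a :: S') = v :: a :: S' from by
          simp [List.orderedInsert, if_pos hva]]
        cases S' with
        | nil => simp [List.orderedInsert]
        | cons b T =>
          have hab : a ≤ b := (List.pairwise_cons.mp hS).1 b (List.mem_cons_self)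
          rw [show List.orderedInsert (· ≤ ·) v (b :: T) = v :: b :: T from by
            simp [List.orderedInsert, if_pos (le_trans hva hab)]]
          rfl
      · rw [show List.orderedInsert (· ≤ ·) v (a :: S') = a :: List.orderedInsert (· ≤ ·) v S' from by
          simp [List.orderedInsert, if_neg hva]]
        rfl

-- the single heap step: pushing v into (the heap holding the top part of G) extends G and drops one more
theorem pvHeapPushPop_heapify_drop (G : List Int) (v : Int) (d : Nat) :
    pvHeapPushPop ((pvHeapify G).drop d) v = (pvHeapify (G ++ [v])).drop (d + 1) := by
  rw [pvHeapPushPop_eq_tail, ← List.drop_one,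
    drop_orderedInsert_drop (pvHeapify G) (pvHeapify_pairwise G) v d, ← pvHeapify_cons,
    pvHeapify_congr_perm ((List.perm_append_singleton v G).symm)]

theorem foldl_pvHeapPushPop (G : List Int) (xs : List Int) (d : Nat) :
    xs.foldl pvHeapPushPop ((pvHeapify G).drop d) = (pvHeapify (G ++ xs)).drop (d + xs.length) := by
  induction xs using List.reverseRecOn with
  | nil => simp
  | append_singleton xs x ih =>
    rw [List.foldl_append, List.foldl_cons, List.foldl_nil, ih,
      pvHeapPushPop_heapify_drop (G ++ xs) x (d + xs.length), ← List.append_assoc]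
    simp [Nat.add_assoc]

theorem pvCapFold_append (ul : Int) (g : List Int) (hg : g ≠ []) (v : Int) :
    pvCapFold ul (g ++ [v]) = pvCapStep ul (pvCapFold ul g) v := by
  cases g with
  | nil => exact absurd rfl hg
  | cons w rest => simp [pvCapFold, List.foldl_append]

theorem length_pvHeapify (l : List Int) : (pvHeapify l).length = l.length :=
  (pvHeapify_perm l).length_eq

theorem pvHeapify_drop_eq_self (l : List Int) (d : Nat) :
    pvHeapify ((pvHeapify l).drop d) = (pvHeapify l).drop d :=
  pvHeapify_eq_self ((pvHeapify_pairwise l).drop)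

theorem pvCapFold_spec (ul : Int) (hul : 1 ≤ ul) (g : List Int) :
    pvCapFold ul g = if g.length ≤ ul.toNat then g else (pvHeapify g).drop (g.length - ul.toNat) := by
  have hul' : 1 ≤ ul.toNat := by omega
  induction g using List.reverseRecOn with
  | nil => simp [pvCapFold]
  | append_singleton g v ih =>
    by_cases hg : g = []
    · subst hg
      simp only [List.nil_append]
      rw [if_pos (by simpa using hul')]
      rfl
    · rw [pvCapFold_append ul g hg v, ih]
      by_cases h1 : g.length ≤ ul.toNat
      · rw [if_pos h1]
        by_cases h2 : g.length < ul.toNat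
        · rw [show pvCapStep ul g v = g ++ [v] from by
            simp only [pvCapStep]; rw [if_pos (by omega)]]
          rw [if_pos (by simpa using h2)]
        · have hlen : g.length = ul.toNat := by omega
          rw [show pvCapStep ul g v = pvHeapPushPop (pvHeapify g) v from by
            simp only [pvCapStep]; rw [if_neg (by omega)]]
          rw [if_neg (by simp; omega)]
          have := pvHeapPushPop_heapify_drop g v 0
          simpa [hlen] using this
      · rw [if_neg h1]
        have hlenm : ((pvHeapify g).drop (g.length - ul.toNat)).length = ul.toNat := by
          simp [length_pvHeapify]; omega
        rw [show pvCapStep ul ((pvHeapify g).drop (g.length - ul.toNat)) v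
            = pvHeapPushPop (pvHeapify ((pvHeapify g).drop (g.length - ul.toNat))) v from by
          simp only [pvCapStep]; rw [if_neg (by rw [hlenm]; omega)]]
        rw [pvHeapify_drop_eq_self, pvHeapPushPop_heapify_drop g v (g.length - ul.toNat)]
        rw [if_neg (by simp; omega)]
        congr 1
        simp; omega

theorem pvCapFold_max (ul : Int) (hul : ul ≤ 0) (g : List Int) (hg : g ≠ []) :
    pvCapFold ul g = (pvHeapify g).drop (g.length - 1) := by
  induction g using List.reverseRecOn with
  | nil => exact absurd rfl hg
  | append_singleton g v ih =>
    by_cases hgnil : g = []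
    · subst hgnil
      simp only [List.nil_append]
      show [v] = (pvHeapify [v]).drop 0
      rw [pvHeapify_eq_self (by simp)]
      rfl
    · rw [pvCapFold_append ul g hgnil v, ih hgnil]
      have hlenm : ((pvHeapify g).drop (g.length - 1)).length = 1 := by
        have : g.length ≠ 0 := by simpa using fun h => hgnil (List.length_eq_zero_iff.mp h)
        simp [length_pvHeapify]; omega
      rw [show pvCapStep ul ((pvHeapify g).drop (g.length - 1)) v
          = pvHeapPushPop (pvHeapify ((pvHeapify g).drop (g.length - 1))) v from by
        simp only [pvCapStep]; rw [if_neg (by rw [hlenm]; omega)]]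
      rw [pvHeapify_drop_eq_self, pvHeapPushPop_heapify_drop g v (g.length - 1)]
      congr 1
      have : g.length ≠ 0 := by simpa using fun h => hgnil (List.length_eq_zero_iff.mp h)
      simp; omega

theorem pvHeapPushPop_subset (h : List Int) (x y : Int) (hy : y ∈ pvHeapPushPop h x) :
    y = x ∨ y ∈ h := by
  rw [pvHeapPushPop_eq_tail] at hy
  have : y ∈ List.orderedInsert (· ≤ ·) x h := List.mem_of_mem_tail hy
  have := (List.perm_orderedInsert (· ≤ ·) x h).mem_iff.mp this
  simpa using this

theorem pvCapFold_subset (ul : Int) (g : List Int) : ∀ x ∈ pvCapFold ul g, x ∈ g := by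
  induction g using List.reverseRecOn with
  | nil => simp [pvCapFold]
  | append_singleton g v ih =>
    by_cases hgnil : g = []
    · subst hgnil; intro x hx
      simpa [pvCapFold] using hx
    · rw [pvCapFold_append ul g hgnil v]
      intro x hx
      simp only [pvCapStep] at hx
      split at hx
      · rcases List.mem_append.mp hx with h | h
        · exact List.mem_append.mpr (Or.inl (ih x h))
        · exact List.mem_append.mpr (Or.inr h)
      · rcases pvHeapPushPop_subset _ _ _ hx with h | h
        · simp [h]
        · have h' : x ∈ pvCapFold ul g := (pvHeapify_perm (pvCapFold ul g)).mem_iff.mp h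
          exact List.mem_append.mpr (Or.inl (ih x h'))

theorem pvCapFold_perm_take (ul : Int) (hul : 1 ≤ ul) (g : List Int) :
    (pvCapFold ul g).Perm (((pvHeapify g).reverse).take ul.toNat) := by
  rw [pvCapFold_spec ul hul g, List.take_reverse, length_pvHeapify]
  by_cases h : g.length ≤ ul.toNat
  · rw [if_pos h, show g.length - ul.toNat = 0 from by omega, List.drop_zero]
    exact ((pvHeapify_perm g).symm).trans (List.reverse_perm _).symm
  · rw [if_neg h]
    exact (List.reverse_perm _).symm

-- descending Python sort is the reverse of the ascending one (Int values; ties carry no data)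
theorem sorted_desc_eq_reverse (g : List Int) :
    PySem.List.sorted g (fun x => x) true = (pvHeapify g).reverse := by
  have h1 : (PySem.List.sorted g (fun x => x) true).Pairwise (fun a b : Int => b ≤ a) := by
    simpa using PySem.List.sorted_pairwise_rev (xs := g) (key := fun x : Int => x)
  have h2 : ((pvHeapify g).reverse).Pairwise (fun a b : Int => b ≤ a) := by
    rw [List.pairwise_reverse]; exact pvHeapify_pairwise g
  have hperm : (PySem.List.sorted g (fun x => x) true).Perm ((pvHeapify g).reverse) := by
    exact (PySem.List.sorted_perm g (fun x => x) true).trans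
      (((pvHeapify_perm g).symm).trans (List.reverse_perm _).symm)
  exact hperm.eq_of_pairwise (fun a b _ _ h1 h2 => le_antisymm h2 h1) h1 h2

theorem pvTakeLimit_eq (s : List Int) : ∀ (k ul : Int) (c : List Int),
    pvTakeLimit s k ul c = c ++ s.take (ul - k).toNat := by
  induction s with
  | nil => intro k ul c; simp [pvTakeLimit]
  | cons v rest ih =>
    intro k ul c
    by_cases h : ul ≤ k
    · rw [show pvTakeLimit (v :: rest) k ul c = c from by simp [pvTakeLimit, if_pos h]]
      rw [show (ul - k).toNat = 0 from by omega]
      simp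
    · rw [show pvTakeLimit (v :: rest) k ul c = pvTakeLimit rest (k + 1) ul (c ++ [v]) from by
        simp [pvTakeLimit, if_neg h]]
      rw [ih (k + 1) ul (c ++ [v]),
        show (ul - k).toNat = (ul - (k + 1)).toNat + 1 from by omega,
        List.take_succ_cons, List.append_assoc]
      rfl

theorem sum_map_max_nonpos {s : List Int} (h : ∀ x ∈ s, x ≤ 0) :
    (s.map (fun v => max v 0)).sum = 0 := by
  induction s with
  | nil => simp
  | cons v rest ih =>
    simp only [List.map_cons, List.sum_cons]
    rw [max_eq_right (h v List.mem_cons_self), ih (fun x hx => h x (List.mem_cons_of_mem v hx))]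
    simp

theorem sum_map_max_nonneg (s : List Int) : 0 ≤ (s.map (fun v => max v 0)).sum := by
  induction s with
  | nil => simp
  | cons v rest ih =>
    simp only [List.map_cons, List.sum_cons]
    have := le_max_right v 0
    omega

theorem pvPick_eq (DS : List Int) (hDS : DS.Pairwise (· ≥ ·)) : ∀ (nw taken total : Int),
    pvPick DS taken nw total = total + ((DS.take (nw - taken).toNat).map (fun v => max v 0)).sum := by
  induction DS with
  | nil => intro nw taken total; simp [pvPick]
  | cons v rest ih =>
    intro nw taken total
    obtain ⟨hrel, hrest⟩ := List.pairwise_cons.mp hDS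
    by_cases h1 : nw ≤ taken
    · rw [show pvPick (v :: rest) taken nw total = total from by simp [pvPick, if_pos (Or.inl h1)]]
      rw [show (nw - taken).toNat = 0 from by omega]
      simp
    · by_cases h2 : v ≤ 0
      · rw [show pvPick (v :: rest) taken nw total = total from by simp [pvPick, h2]]
        rw [sum_map_max_nonpos (fun x hx => by
          rcases List.mem_cons.mp (List.take_subset _ _ hx) with h | h
          · omega
          · have := hrel x h; omega)]
        simp
      · rw [show pvPick (v :: rest) taken nw total = pvPick rest (taken + 1) nw (total + v) from by
          simp [pvPick, if_neg (by omega : ¬ (nw ≤ taken ∨ v ≤ 0))]]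
        rw [ih hrest nw (taken + 1) (total + v),
          show (nw - taken).toNat = (nw - (taken + 1)).toNat + 1 from by omega,
          List.take_succ_cons]
        simp only [List.map_cons, List.sum_cons]
        rw [max_eq_left (by omega)]
        ring

-- sorted elements below / at-or-above the zero cut
theorem sorted_dropWhile_nonneg {S : List Int} (h : S.Pairwise (· ≤ ·)) :
    ∀ x ∈ S.dropWhile (· < 0), 0 ≤ x := by
  induction S with
  | nil => simp
  | cons a S' ih =>
    obtain ⟨hrel, hS'⟩ := List.pairwise_cons.mp h
    by_cases ha : a < 0
    · rw [List.dropWhile_cons_of_pos (by simpa using ha)]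
      exact ih hS'
    · rw [List.dropWhile_cons_of_neg (by simpa using ha)]
      intro x hx
      rcases List.mem_cons.mp hx with hx | hx
      · omega
      · have := hrel x hx; omega

-- the zero-seeded result heap, fully folded: its sum is the clipped top-K sum of the pushed values
theorem map_max_eq_self {s : List Int} (h : ∀ x ∈ s, 0 ≤ x) :
    s.map (fun v => max v 0) = s := by
  induction s with
  | nil => rfl
  | cons v rest ih =>
    simp only [List.map_cons]
    rw [max_eq_left (h v List.mem_cons_self), ih (fun x hx => h x (List.mem_cons_of_mem v hx))]

theorem zero_heap_sum (K : Nat) (N : List Int) :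
    ((pvHeapify (List.replicate K 0 ++ N)).drop N.length).sum
      = (((pvHeapify N).reverse.take K).map (fun v => max v 0)).sum := by
  have hApw : (pvHeapify N).Pairwise (· ≤ ·) := pvHeapify_pairwise N
  set A := pvHeapify N with hAdef
  set tw := A.takeWhile (fun x : Int => decide (x < 0)) with htw
  set dw := A.dropWhile (fun x : Int => decide (x < 0)) with hdw
  have htwdw : tw ++ dw = A := List.takeWhile_append_dropWhile
  have htwneg : ∀ x ∈ tw, x < 0 := fun x hx => by
    have := List.mem_takeWhile_imp hx; simpa using this
  have hdwpos : ∀ x ∈ dw, 0 ≤ x := sorted_dropWhile_nonneg hApw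
  have hlen : tw.length + dw.length = N.length := by
    have h1 : (tw ++ dw).length = A.length := by rw [htwdw]
    have h2 : A.length = N.length := length_pvHeapify N
    simpa using h1.trans h2
  have hsplit : pvHeapify (List.replicate K 0 ++ N) = tw ++ (List.replicate K (0:Int) ++ dw) := by
    have hperm : (tw ++ (List.replicate K (0:Int) ++ dw)).Perm (List.replicate K (0:Int) ++ N) := by
      have p1 : (tw ++ (List.replicate K (0:Int) ++ dw)).Perm (tw ++ (dw ++ List.replicate K (0:Int))) :=
        List.Perm.append_left tw List.perm_append_comm
      have p2 : (tw ++ (dw ++ List.replicate K (0:Int))).Perm (N ++ List.replicate K (0:Int)) := by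
        rw [← List.append_assoc, htwdw]
        exact List.Perm.append_right _ (pvHeapify_perm N)
      exact (p1.trans p2).trans List.perm_append_comm
    have hpw : (tw ++ (List.replicate K (0:Int) ++ dw)).Pairwise (· ≤ ·) := by
      rw [List.pairwise_append]
      refine ⟨List.Pairwise.sublist (List.takeWhile_sublist _) hApw, ?_, ?_⟩
      · rw [List.pairwise_append]
        refine ⟨List.pairwise_replicate.mpr (Or.inr le_rfl),
          List.Pairwise.sublist (List.dropWhile_sublist _) hApw, ?_⟩
        intro x hx y hy
        rw [List.eq_of_mem_replicate hx]
        exact hdwpos y hy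
      · intro x hx y hy
        have hxneg := htwneg x hx
        rcases List.mem_append.mp hy with h | h
        · rw [List.eq_of_mem_replicate h]; omega
        · have := hdwpos y h; omega
    have := PySem.List.sorted_id_eq_of_perm_of_pairwise
      (xs := List.replicate K (0:Int) ++ N) (ys := tw ++ (List.replicate K (0:Int) ++ dw)) hperm hpw
    simpa [pvHeapify] using this
  rw [hsplit]
  have hL : ((tw ++ (List.replicate K (0:Int) ++ dw)).drop N.length).sum = (dw.drop (dw.length - K)).sum := by
    rw [List.drop_append, List.drop_eq_nil_of_le (by omega), List.drop_append, List.drop_replicate]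
    have h0 : (List.replicate (K - (N.length - tw.length)) (0:Int)).sum = 0 := by simp
    rw [List.nil_append, List.sum_append, h0, zero_add]
    congr 2
    simp [List.length_replicate]
    omega
  rw [hL]
  have hrev : A.reverse = dw.reverse ++ tw.reverse := by
    rw [← htwdw, List.reverse_append]
  rw [hrev, List.take_append, List.length_reverse, List.take_reverse]
  rw [List.map_append, List.sum_append]
  have hright : ((tw.reverse.take (K - dw.length)).map (fun v => max v 0)).sum = 0 :=
    sum_map_max_nonpos (fun x hx => by
      have : x ∈ tw := List.mem_reverse.mp (List.take_subset _ _ hx)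
      have := htwneg x this; omega)
  have hleft : (((dw.drop (dw.length - K)).reverse).map (fun v => max v 0)).sum
      = (dw.drop (dw.length - K)).sum := by
    rw [map_max_eq_self (fun x hx => hdwpos x (List.drop_subset _ _ (List.mem_reverse.mp hx)))]
    simp
  rw [hright, hleft, add_zero]

-- ==== the dict correspondence: A's stats versus B's groups ====

def pvAStep (ul : Int) (stats : PySem.Dict Int (List Int)) (lv : Int × Int) : PySem.Dict Int (List Int) :=
  match stats.get? lv.1 with
  | none => stats.insert lv.1 [lv.2]
  | some g => stats.insert lv.1 (pvCapStep ul g lv.2)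

def pvBStep (d : PySem.Dict Int (List Int)) (lv : Int × Int) : PySem.Dict Int (List Int) :=
  d.modify lv.1 [] (· ++ [lv.2])

theorem items_eq_keys_map (d : PySem.Dict Int (List Int)) (h : d.keys.Nodup) :
    d.items = d.keys.map (fun k => (k, d.getD k [])) := by
  have hpt : ∀ p ∈ d.items, (p.1, d.getD p.1 []) = p := by
    intro p hp
    obtain ⟨k, v⟩ := p
    rw [PySem.Dict.getD_of_mem_items d hp h]
  have hmap : d.items.map (fun p => (p.1, d.getD p.1 [])) = d.items := by
    have := List.map_congr_left hpt
    simpa using this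
  have hk : d.keys = d.items.map (·.1) := rfl
  rw [hk, List.map_map]
  exact hmap.symm

theorem dict_correspondence (ul : Int) (ps : List (Int × Int)) :
    ∀ (a b : PySem.Dict Int (List Int)),
      a.keys = b.keys → b.keys.Nodup → (∀ p ∈ b.items, p.2 ≠ []) →
      (∀ k, a.getD k [] = pvCapFold ul (b.getD k [])) →
      ((ps.foldl (pvAStep ul) a).keys = (ps.foldl pvBStep b).keys ∧
       (ps.foldl pvBStep b).keys.Nodup ∧
       (∀ p ∈ (ps.foldl pvBStep b).items, p.2 ≠ []) ∧
       (∀ k, (ps.foldl (pvAStep ul) a).getD k [] = pvCapFold ul ((ps.foldl pvBStep b).getD k []))) := by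
  induction ps with
  | nil => intro a b h1 h2 h3 h4; exact ⟨h1, h2, h3, h4⟩
  | cons p ps ih =>
    intro a b h1 h2 h3 h4
    simp only [List.foldl_cons]
    have hbkeys : (pvBStep b p).keys = (b.insert p.1 (b.getD p.1 [] ++ [p.2])).keys :=
      PySem.Dict.keys_modify b p.1 [] (· ++ [p.2])
    have hbgetD : ∀ k, (pvBStep b p).getD k [] = if k = p.1 then b.getD p.1 [] ++ [p.2] else b.getD k [] :=
      fun k => PySem.Dict.getD_modify b p.1 k [] (· ++ [p.2])
    by_cases hc : p.1 ∈ b.keys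
    · -- existing key
      have hbc : b.contains p.1 = true := (PySem.Dict.contains_iff_mem_keys b p.1).mpr hc
      have hbkeys' : (pvBStep b p).keys = b.keys := by
        rw [hbkeys, PySem.Dict.keys_insert_of_contains b _ hbc]
      obtain ⟨w, hw⟩ : ∃ w, a.get? p.1 = some w := by
        cases hget : a.get? p.1 with
        | none => exact absurd (h1 ▸ (PySem.Dict.get?_eq_none_iff_not_mem_keys a p.1).mp hget) (by simpa using hc)
        | some w => exact ⟨w, rfl⟩
      have hwval : w = pvCapFold ul (b.getD p.1 []) := by
        have := PySem.Dict.getD_of_get?_eq_some a ([] : List Int) hw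
        rw [← this, h4 p.1]
      have hgne : b.getD p.1 [] ≠ [] := by
        have hmem : (p.1, b.getD p.1 []) ∈ b.items := by
          rw [items_eq_keys_map b h2]
          exact List.mem_map.mpr ⟨p.1, hc, rfl⟩
        exact h3 _ hmem
      have hastep : pvAStep ul a p = a.insert p.1 (pvCapFold ul (b.getD p.1 [] ++ [p.2])) := by
        simp only [pvAStep, hw, hwval]
        rw [pvCapFold_append ul _ hgne]
      have hac : a.contains p.1 = true := (PySem.Dict.contains_iff_mem_keys a p.1).mpr (h1 ▸ hc)
      apply ih
      · rw [hastep, PySem.Dict.keys_insert_of_contains a _ hac, hbkeys', h1]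
      · rw [hbkeys']; exact h2
      · intro q hq
        rw [items_eq_keys_map _ (hbkeys' ▸ h2)] at hq
        obtain ⟨k, hk, hqeq⟩ := List.mem_map.mp hq
        rw [← hqeq]
        simp only [hbgetD k]
        split
        · simp
        · exact h3 (k, b.getD k []) (by
            rw [items_eq_keys_map b h2]
            exact List.mem_map.mpr ⟨k, hbkeys' ▸ hk, rfl⟩)
      · intro k
        rw [hastep, PySem.Dict.getD_insert, hbgetD k]
        split
        · rfl
        · exact h4 k
    · -- fresh key
      have hbc : b.contains p.1 = false := by
        rw [← Bool.not_eq_true, PySem.Dict.contains_iff_mem_keys]; exact hc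
      have hbg0 : b.getD p.1 [] = [] := PySem.Dict.getD_of_not_contains b [] hbc
      have hbkeys' : (pvBStep b p).keys = b.keys ++ [p.1] := by
        rw [hbkeys, PySem.Dict.keys_insert_of_not_contains b _ hbc]
      have hget : a.get? p.1 = none :=
        (PySem.Dict.get?_eq_none_iff_not_mem_keys a p.1).mpr (h1 ▸ hc)
      have hastep : pvAStep ul a p = a.insert p.1 [p.2] := by
        simp only [pvAStep, hget]
      have hac : a.contains p.1 = false := by
        rw [← Bool.not_eq_true, PySem.Dict.contains_iff_mem_keys]; exact h1 ▸ hc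
      have hnodup' : (pvBStep b p).keys.Nodup := by
        rw [hbkeys']
        simp [List.nodup_append, h2]
        exact fun k hk he => hc (he ▸ hk)
      apply ih
      · rw [hastep, PySem.Dict.keys_insert_of_not_contains a _ hac, hbkeys', h1]
      · exact hnodup'
      · intro q hq
        rw [items_eq_keys_map _ hnodup'] at hq
        obtain ⟨k, hk, hqeq⟩ := List.mem_map.mp hq
        rw [← hqeq]
        simp only [hbgetD k]
        split
        · simp [hbg0]
        · exact h3 (k, b.getD k []) (by
            rw [items_eq_keys_map b h2]
            refine List.mem_map.mpr ⟨k, ?_, rfl⟩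
            rw [hbkeys'] at hk
            rcases List.mem_append.mp hk with h | h
            · exact h
            · simp at h
              subst h
              exact absurd rfl (by
                rename_i hne
                exact hne))
      · intro k
        rw [hastep, PySem.Dict.getD_insert, hbgetD k]
        split
        · rw [hbg0]; rfl
        · exact h4 k

theorem values_correspondence (ul : Int) (ps : List (Int × Int)) :
    (ps.foldl (pvAStep ul) PySem.Dict.empty).values
      = ((ps.foldl pvBStep PySem.Dict.empty).values).map (pvCapFold ul) := by
  obtain ⟨hk, hnd, hne, hg⟩ := dict_correspondence ul ps PySem.Dict.empty PySem.Dict.empty rfl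
    PySem.Dict.nodup_keys_empty (by
      intro p hp
      exact absurd (by exact hp : p ∈ ([] : List (Int × List Int))) (List.not_mem_nil))
    (fun k => rfl)
  set aD := ps.foldl (pvAStep ul) PySem.Dict.empty with haD
  set bD := ps.foldl pvBStep PySem.Dict.empty with hbD
  have hand : aD.keys.Nodup := by rw [hk]; exact hnd
  have ha : aD.values = aD.keys.map (fun k => aD.getD k []) := by
    show aD.items.map (·.2) = _
    rw [items_eq_keys_map aD hand, List.map_map]
    rfl
  have hb : bD.values = bD.keys.map (fun k => bD.getD k []) := by
    show bD.items.map (·.2) = _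
    rw [items_eq_keys_map bD hnd, List.map_map]
    rfl
  rw [ha, hb, List.map_map, hk]
  exact List.map_congr_left (fun k _ => hg k)

-- elements of B's groups all come from the zipped value list
theorem bdict_nodup_keys (ps : List (Int × Int)) :
    (ps.foldl pvBStep PySem.Dict.empty).keys.Nodup :=
  PySem.Dict.nodup_keys_foldl_modify_key ps (fun lv : Int × Int => lv.1) ([] : List Int)
    (fun _ lv => (· ++ [lv.2])) PySem.Dict.empty PySem.Dict.nodup_keys_empty

theorem bdict_getD (ps : List (Int × Int)) (k : Int) :
    (ps.foldl pvBStep PySem.Dict.empty).getD k []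
      = (ps.filter (fun p => p.1 == k)).map (·.2) :=
  PySem.Dict.getD_foldl_modify_append ps PySem.Dict.empty k

theorem bdict_values_subset (ps : List (Int × Int)) :
    ∀ g ∈ (ps.foldl pvBStep PySem.Dict.empty).values, ∀ x ∈ g, x ∈ ps.map (·.2) := by
  intro g hg x hx
  have hg' : g ∈ (ps.foldl pvBStep PySem.Dict.empty).items.map (·.2) := hg
  obtain ⟨q, hq, hq2⟩ := List.mem_map.mp hg'
  obtain ⟨k, v⟩ := q
  have hgd : (ps.foldl pvBStep PySem.Dict.empty).getD k [] = v :=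
    PySem.Dict.getD_of_mem_items _ hq (bdict_nodup_keys ps) []
  rw [bdict_getD ps k] at hgd
  have hxv : x ∈ (ps.filter (fun p => p.1 == k)).map (·.2) := by
    rw [hgd]; rw [← hq2] at hx; exact hx
  obtain ⟨q', hq', hq'2⟩ := List.mem_map.mp hxv
  exact List.mem_map.mpr ⟨q', List.filter_subset' _ hq', hq'2⟩

theorem bdict_values_cover (ps : List (Int × Int)) :
    ∀ p ∈ ps, ∃ g ∈ (ps.foldl pvBStep PySem.Dict.empty).values, p.2 ∈ g := by
  intro p hp
  have hkeys : (ps.foldl pvBStep PySem.Dict.empty).keys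
      = PySem.Set.update PySem.Dict.empty.keys (ps.map (fun lv => lv.1)) :=
    PySem.Dict.keys_foldl_modify_key ps (fun lv : Int × Int => lv.1) ([] : List Int)
      (fun _ lv => (· ++ [lv.2])) PySem.Dict.empty
  have hkmem : p.1 ∈ (ps.foldl pvBStep PySem.Dict.empty).keys := by
    rw [hkeys]
    exact (PySem.Set.mem_update _ _ _).mpr (Or.inr (List.mem_map.mpr ⟨p, hp, rfl⟩))
  refine ⟨(ps.foldl pvBStep PySem.Dict.empty).getD p.1 [], ?_, ?_⟩
  · have hmem : ((p.1, (ps.foldl pvBStep PySem.Dict.empty).getD p.1 []) : Int × List Int)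
        ∈ (ps.foldl pvBStep PySem.Dict.empty).items := by
      rw [items_eq_keys_map _ (bdict_nodup_keys ps)]
      exact List.mem_map.mpr ⟨p.1, hkmem, rfl⟩
    exact List.mem_map.mpr ⟨_, hmem, rfl⟩
  · rw [bdict_getD ps p.1]
    exact List.mem_map.mpr ⟨p, List.mem_filter.mpr ⟨hp, by simp⟩, rfl⟩

-- closed forms of the two ports
theorem portA_closed (values labels : List Int) (num_wanted use_limit : Int) :
    largestValsFromLabels values labels num_wanted use_limit
      = (((pvHeapify (((labels.zip values).foldl pvBStep PySem.Dict.empty).values.flatMap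
            (pvCapFold use_limit))).reverse.take num_wanted.toNat).map (fun v => max v 0)).sum := by
  have hfun : (fun (stats : PySem.Dict Int (List Int)) (lv : Int × Int) =>
      match stats.get? lv.1 with
      | none => stats.insert lv.1 [lv.2]
      | some g => if (g.length : Int) < use_limit then stats.insert lv.1 (g ++ [lv.2])
                  else stats.insert lv.1 (pvHeapPushPop (pvHeapify g) lv.2)) = pvAStep use_limit := by
    funext st lv
    simp only [pvAStep, pvCapStep]
    cases st.get? lv.1 with
    | none => rfl
    | some g => by_cases hc : (g.length : Int) < use_limit <;> simp [hc]
  have hnest : ∀ (L : List (List Int)) (r0 : List Int),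
      L.foldl (fun res nums => nums.foldl (fun r num => pvHeapPushPop r num) res) r0
        = L.flatten.foldl pvHeapPushPop r0 := fun L r0 => (List.foldl_flatten).symm
  unfold largestValsFromLabels
  simp only [hfun, hnest]
  rw [values_correspondence use_limit (labels.zip values), ← List.flatMap_def]
  rw [show pvHeapify (List.replicate num_wanted.toNat 0)
      = (pvHeapify (List.replicate num_wanted.toNat 0)).drop 0 from List.drop_zero.symm]
  rw [foldl_pvHeapPushPop]
  rw [Nat.zero_add]
  exact zero_heap_sum num_wanted.toNat _

theorem portB_closed (values labels : List Int) (num_wanted use_limit : Int) :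
    largestValsFromLabels_alt values labels num_wanted use_limit
      = (((pvHeapify (((labels.zip values).foldl pvBStep PySem.Dict.empty).values.flatMap
            (fun g => ((pvHeapify g).reverse).take use_limit.toNat))).reverse.take num_wanted.toNat).map
          (fun v => max v 0)).sum := by
  have hcands : ∀ (L : List (List Int)),
      L.foldl (fun cands g => pvTakeLimit (PySem.List.sorted g (fun x => x) true) 0 use_limit cands) []
        = L.flatMap (fun g => ((pvHeapify g).reverse).take use_limit.toNat) := by
    intro L
    rw [PySem.List.foldl_congr_mem L _
      (fun cands g => cands ++ ((pvHeapify g).reverse).take use_limit.toNat) []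
      (by
        intro acc g hg
        rw [pvTakeLimit_eq, sorted_desc_eq_reverse]
        norm_num)]
    rw [PySem.List.foldl_append_eq_flatMap]
    simp
  unfold largestValsFromLabels_alt
  simp only [show (fun (d : PySem.Dict Int (List Int)) (lv : Int × Int) =>
      d.modify lv.1 [] (· ++ [lv.2])) = pvBStep from rfl]
  rw [hcands, sorted_desc_eq_reverse]
  rw [pvPick_eq _ (List.pairwise_reverse.mpr (pvHeapify_pairwise _)) num_wanted 0 0]
  norm_num

theorem flatMap_perm_pointwise (L : List (List Int)) (f h : List Int → List Int)
    (hp : ∀ g ∈ L, (f g).Perm (h g)) : (L.flatMap f).Perm (L.flatMap h) := by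
  induction L with
  | nil => rfl
  | cons g L ih =>
    rw [List.flatMap_cons, List.flatMap_cons]
    exact List.Perm.append (hp g List.mem_cons_self)
      (ih (fun g' hg' => hp g' (List.mem_cons_of_mem g hg')))

theorem flatMap_const_nil (L : List (List Int)) : (L.flatMap (fun _ => ([] : List Int))) = [] := by
  induction L with
  | nil => rfl
  | cons g L ih => simpa using ih

theorem mem_flat_mem_values {values labels : List Int} {ul : Int} {x : Int}
    (hx : x ∈ ((labels.zip values).foldl pvBStep PySem.Dict.empty).values.flatMap (pvCapFold ul)) :
    x ∈ values := by
  obtain ⟨g, hgmem, hxg⟩ := List.mem_flatMap.mp hx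
  have hx2 : x ∈ g := pvCapFold_subset ul g x hxg
  have hx3 : x ∈ (labels.zip values).map (·.2) :=
    bdict_values_subset (labels.zip values) g hgmem x hx2
  obtain ⟨p, hp, hp2⟩ := List.mem_map.mp hx3
  have := List.of_mem_zip hp
  rw [← hp2]
  exact this.2

theorem exists_ge_in_last (l : List Int) (h : l.Pairwise (· ≤ ·)) :
    ∀ x ∈ l, ∃ m ∈ l.drop (l.length - 1), x ≤ m := by
  induction l with
  | nil => intro x hx; cases hx
  | cons a t ih =>
    obtain ⟨hrel, ht⟩ := List.pairwise_cons.mp h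
    intro x hx
    cases t with
    | nil =>
      rcases List.mem_cons.mp hx with rfl | hx'
      · exact ⟨x, by simp, le_rfl⟩
      · cases hx'
    | cons b t' =>
      have hdrop : (a :: b :: t').drop ((a :: b :: t').length - 1)
          = (b :: t').drop ((b :: t').length - 1) := by
        simp only [List.length_cons]
        rw [show t'.length + 1 + 1 - 1 = t'.length + 1 from by omega, List.drop_succ_cons]
        rfl
      rw [hdrop]
      rcases List.mem_cons.mp hx with rfl | hx'
      · obtain ⟨m, hm, hbm⟩ := ih ht b List.mem_cons_self
        exact ⟨m, hm, le_trans (hrel b List.mem_cons_self) hbm⟩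
      · exact ih ht x hx'

-- ===== VERDICT =====
theorem largestValsFromLabels_spec : Claim_unchanged_largestValsFromLabels := by
  intro values labels num_wanted use_limit hDom hPre hnD
  rw [portA_closed, portB_closed]
  by_cases hul : 1 ≤ use_limit
  · have hperm : (((labels.zip values).foldl pvBStep PySem.Dict.empty).values.flatMap
        (pvCapFold use_limit)).Perm
        (((labels.zip values).foldl pvBStep PySem.Dict.empty).values.flatMap
          (fun g => ((pvHeapify g).reverse).take use_limit.toNat)) := by
      exact flatMap_perm_pointwise _ _ _ (fun g _ => pvCapFold_perm_take use_limit hul g)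
    rw [pvHeapify_congr_perm hperm]
  · have hul' : use_limit ≤ 0 := by omega
    have htn : use_limit.toNat = 0 := by omega
    rw [show (fun (g : List Int) => ((pvHeapify g).reverse).take use_limit.toNat)
        = (fun _ => ([] : List Int)) from by funext g; rw [htn, List.take_zero],
      flatMap_const_nil]
    rw [show pvHeapify ([] : List Int) = [] from rfl]
    simp only [List.reverse_nil, List.take_nil, List.map_nil, List.sum_nil]
    unfold D_largestValsFromLabels at hnD
    by_cases hnw : 0 < num_wanted
    · have hall : ∀ v ∈ values, v ≤ 0 := by
        by_contra hno
        push_neg at hno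
        obtain ⟨v, hv, hvpos⟩ := hno
        exact hnD ⟨hul', hnw, v, hv, by omega⟩
      apply sum_map_max_nonpos
      intro x hx
      have hx1 : x ∈ (pvHeapify (((labels.zip values).foldl pvBStep PySem.Dict.empty).values.flatMap
          (pvCapFold use_limit))).reverse := List.take_subset _ _ hx
      have hx2 := (pvHeapify_perm _).mem_iff.mp (List.mem_reverse.mp hx1)
      exact hall x (mem_flat_mem_values hx2)
    · rw [show num_wanted.toNat = 0 from by omega]
      simp

theorem largestValsFromLabels_changed : Claim_changed_largestValsFromLabels := by
  unfold Claim_changed_largestValsFromLabels; decide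

theorem largestValsFromLabels_tight : Claim_exact_largestValsFromLabels := by
  intro values labels num_wanted use_limit hDom hPre hD
  obtain ⟨hul, hnw, v, hv, hvpos⟩ := hD
  rw [portA_closed, portB_closed]
  have htn : use_limit.toNat = 0 := by omega
  rw [show (fun (g : List Int) => ((pvHeapify g).reverse).take use_limit.toNat)
      = (fun _ => ([] : List Int)) from by funext g; rw [htn, List.take_zero],
    flatMap_const_nil]
  rw [show pvHeapify ([] : List Int) = [] from rfl]
  simp only [List.reverse_nil, List.take_nil, List.map_nil, List.sum_nil]
  set ps := labels.zip values with hps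
  have hmapsnd : ps.map (fun p : Int × Int => p.2) = values := by
    rw [hps]; exact List.map_snd_zip hPre
  have hvin : v ∈ ps.map (fun p : Int × Int => p.2) := hmapsnd ▸ hv
  obtain ⟨p, hp, hp2⟩ := List.mem_map.mp hvin
  obtain ⟨g, hgmem, hvg⟩ := bdict_values_cover ps p hp
  have hvg' : v ∈ g := hp2 ▸ hvg
  have hgne : g ≠ [] := fun h => by simp [h] at hvg'
  have hcap := pvCapFold_max use_limit hul g hgne
  obtain ⟨m, hm, hvm⟩ := exists_ge_in_last (pvHeapify g) (pvHeapify_pairwise g) v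
    ((pvHeapify_perm g).mem_iff.mpr hvg')
  have hmcap : m ∈ pvCapFold use_limit g := by
    rw [hcap]
    rw [length_pvHeapify] at hm
    exact hm
  have hmN : m ∈ (ps.foldl pvBStep PySem.Dict.empty).values.flatMap (pvCapFold use_limit) :=
    List.mem_flatMap.mpr ⟨g, hgmem, hmcap⟩
  have hmpos : 0 < m := by omega
  set N := (ps.foldl pvBStep PySem.Dict.empty).values.flatMap (pvCapFold use_limit) with hN
  have hmDS : m ∈ (pvHeapify N).reverse := List.mem_reverse.mpr ((pvHeapify_perm N).mem_iff.mpr hmN)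
  cases hDS : (pvHeapify N).reverse with
  | nil => rw [hDS] at hmDS; cases hmDS
  | cons h t =>
    have hpw : (h :: t).Pairwise (fun a b : Int => b ≤ a) := by
      rw [← hDS, List.pairwise_reverse]
      exact pvHeapify_pairwise N
    have hh : 0 < h := by
      rcases List.mem_cons.mp (hDS ▸ hmDS) with rfl | hm'
      · exact hmpos
      · have := (List.pairwise_cons.mp hpw).1 m hm'; omega
    obtain ⟨K', hK'⟩ : ∃ K', num_wanted.toNat = K' + 1 := ⟨num_wanted.toNat - 1, by omega⟩
    rw [hK', List.take_succ_cons]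
    simp only [List.map_cons, List.sum_cons]
    have h1 : max h 0 = h := max_eq_left (by omega)
    have h2 := sum_map_max_nonneg (t.take K')
    omega
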